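-- pv_equiv track=rewrite | github.com/rhyllus/YLyceum_pygameProj | project_att1.py | num_converter
-- ===== SOURCE A (Python) =====
-- def num_converter(num):
--     result1 = 1
--     result2 = 0
--     for i in range(num):
--         result2 += 1
--         if result2 == 4:
--             result1 += 1
--             result2 = 1
--     return '{}-{}.txt'.format(result1, result2)
-- ===== SOURCE B (Python) =====
-- def num_converter(num):
--     if num <= 0:
--         return '1-0.txt'
--     return '{}-{}.txt'.format((num - 1) // 3 + 1, (num - 1) % 3 + 1)
-- ===== Notes on version B (the rewrite author's own statement) =====
-- stated objective: faster
-- what changed: Replaces the linear simulated base-3 counter loop by closed-form floor-division/modulus arithmetic, with nonpositive num handled as the loop-free base case.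
import Mathlib
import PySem

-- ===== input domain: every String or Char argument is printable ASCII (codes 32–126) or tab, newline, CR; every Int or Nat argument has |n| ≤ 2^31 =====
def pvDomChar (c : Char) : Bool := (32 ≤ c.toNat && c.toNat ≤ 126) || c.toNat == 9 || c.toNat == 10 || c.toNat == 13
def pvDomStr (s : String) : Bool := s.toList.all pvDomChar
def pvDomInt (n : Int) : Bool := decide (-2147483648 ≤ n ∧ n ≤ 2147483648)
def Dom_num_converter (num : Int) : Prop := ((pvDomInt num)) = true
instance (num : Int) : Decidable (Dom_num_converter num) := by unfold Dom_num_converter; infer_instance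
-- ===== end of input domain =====

-- B replaces A's O(num) counter loop by closed-form arithmetic (faster in a timing run).

-- ===== PORT A =====
-- one iteration of A's loop body on the state (result1, result2)
def pvStep (p : Int × Int) : Int × Int :=
  let r2 := p.2 + 1
  if r2 == 4 then (p.1 + 1, 1) else (p.1, r2)

def num_converter (num : Int) : String :=
  let st := (PySem.List.pyRange 0 num 1).foldl (fun p _ => pvStep p) (1, 0)
  PySem.Int.toStr st.1 ++ "-" ++ PySem.Int.toStr st.2 ++ ".txt"

-- ===== PORT B =====
def num_converter_alt (num : Int) : String :=
  if num ≤ 0 then "1-0.txt"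
  else PySem.Int.toStr (PySem.Int.floordiv (num - 1) 3 + 1) ++ "-" ++
       PySem.Int.toStr (PySem.Int.mod (num - 1) 3 + 1) ++ ".txt"

-- ===== PRECONDITION & SPEC =====
def Spec_num_converter (num : Int) (out : String) : Prop := out = num_converter_alt num
instance (num : Int) (out : String) : Decidable (Spec_num_converter num out) := by unfold Spec_num_converter; infer_instance

-- ===== CLAIM (what is proved, stated in full; the proofs are below) =====
def Claim_equal_num_converter : Prop := ∀ (num : Int), Dom_num_converter num → Spec_num_converter num (num_converter num)

-- ===== LEMMAS AND PROOFS =====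

lemma pvStep_loop (n : Nat) :
    (List.range n).foldl (fun p _ => pvStep p) ((1 : Int), (0 : Int)) =
      if n = 0 then ((1 : Int), (0 : Int))
      else ((((n - 1) / 3 : Nat) : Int) + 1, (((n - 1) % 3 : Nat) : Int) + 1) := by
  induction n with
  | zero => simp
  | succ m ih =>
    rw [List.range_succ, List.foldl_append, ih]
    by_cases hm : m = 0
    · subst hm; simp [pvStep]
    · simp only [hm, Nat.succ_ne_zero, if_false]
      have h3 : (m - 1) % 3 = 0 ∨ (m - 1) % 3 = 1 ∨ (m - 1) % 3 = 2 := by omega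
      simp only [List.foldl_cons, List.foldl_nil, pvStep]
      rcases h3 with h | h | h <;>
        · rw [h]
          norm_num [Prod.ext_iff]
          omega

lemma num_converter_eq_alt (num : Int) : num_converter num = num_converter_alt num := by
  unfold num_converter num_converter_alt
  rw [PySem.List.pyRange_one]
  rw [List.foldl_map]
  rw [pvStep_loop]
  by_cases h : num ≤ 0
  · simp [h]
    decide
  · have hn : (num - 0).toNat ≠ 0 := by omega
    have hnum : (((num - 0).toNat : Int)) = num := by omega
    simp only [hn, h, if_false]
    have h1 : ((((num - 0).toNat - 1) / 3 : Nat) : Int) = PySem.Int.floordiv (num - 1) 3 := by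
      rw [PySem.Int.floordiv_eq_ediv_of_pos (by omega)]
      omega
    have h2 : ((((num - 0).toNat - 1) % 3 : Nat) : Int) = PySem.Int.mod (num - 1) 3 := by
      rw [PySem.Int.mod_eq_emod_of_pos (by omega)]
      omega
    rw [h1, h2]

-- ===== VERDICT (by name: the statement is the Claim_ definition above) =====
theorem num_converter_spec : Claim_equal_num_converter := by
  intro num _
  exact num_converter_eq_alt num
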